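-- pv_equiv track=rewrite | github.com/baldwinchang/adventofcode-2017 | day-three/spiral.py | layer_sides
-- ===== SOURCE A (Python) =====
-- def layer_values(layer):
--     if layer == 0:
--         return [1]
--
--     layer_square = layer * 2 + 1
--     return [value for value in range(((layer_square - 2) ** 2) + 1, (layer_square ** 2) + 1)]
--
-- def layer_corners(layer):
--     values = layer_values(layer)
--     step = int(len(values) / 4)
--     return [values[step*(i + 1) - 1] for i in range(4)]
--
-- def layer_sides(layer):
--     if layer == 0:
--         return [[1], [1], [1], [1]]
--
--     side_length = (2 * layer) - 1
--     values = layer_values(layer)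
--     corners = layer_corners(layer)
--
--     sides = list()
--     for i in range(4):
--         side = list()
--         side.append(corners[(i - 1) % len(corners)])
--         side.extend(values[i*side_length + i:(i+1)*side_length + i])
--         side.append(corners[i % len(corners)])
--
--         sides.append(side)
--     return sides
-- ===== SOURCE B (Python) =====
-- def layer_sides(layer):
--     # Closed form: each side of ring `layer` is a contiguous run of integers,
--     # computed directly from arithmetic bounds (no ring list, no corners helper).
--     if layer == 0:
--         return [[1], [1], [1], [1]]
--     n = 2 * layer
--     start = (n - 1) ** 2 + 1          # first value of the ring
--     last = start + 4 * n - 1          # last value of the ring (= (2*layer+1)**2)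
--     sides = [[last] + list(range(start, start + n))]
--     for i in range(1, 4):
--         sides.append(list(range(start + n * i - 1, start + n * (i + 1))))
--     return sides
-- ===== Notes on version B (the rewrite author's own statement) =====
-- stated objective: simpler
-- what changed: B drops the layer_values/layer_corners helpers and the per-side modular corner lookups: each side is emitted directly as one closed-form arithmetic range, with the wrapping first side built as the ring's last value followed by the initial run; constant-factor speedup from never materializing the full ring list or re-deriving corners.
import Mathlib
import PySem

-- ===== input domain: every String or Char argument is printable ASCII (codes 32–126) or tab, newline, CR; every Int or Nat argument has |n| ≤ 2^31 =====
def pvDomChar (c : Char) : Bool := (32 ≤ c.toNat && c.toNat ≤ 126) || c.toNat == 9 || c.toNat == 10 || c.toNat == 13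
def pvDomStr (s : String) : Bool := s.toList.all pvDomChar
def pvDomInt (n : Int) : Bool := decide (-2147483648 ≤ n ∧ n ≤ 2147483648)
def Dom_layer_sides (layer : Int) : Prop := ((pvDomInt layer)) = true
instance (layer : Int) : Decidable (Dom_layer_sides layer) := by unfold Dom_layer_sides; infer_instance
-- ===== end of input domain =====

-- B replaces A's ring-list + corners-helper construction by a closed-form build of each
-- side directly from arithmetic bounds (objective: simpler).

-- ===== PORT A =====
def layer_values (layer : Int) : List Int :=
  if layer == 0 then [1]
  else
    let layer_square := layer * 2 + 1
    PySem.List.pyRange (((layer_square - 2) ^ 2) + 1) ((layer_square ^ 2) + 1) 1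

def layer_corners (layer : Int) : List Int :=
  let values := layer_values layer
  -- int(len(values)/4): float division then truncation; exact as Int truncdiv on this domain (len ≤ 2^35 < 2^53)
  let step : Int := PySem.Int.truncdiv (values.length : Int) 4
  (PySem.List.pyRange 0 4 1).map (fun i => PySem.List.pyGetD values (step * (i + 1) - 1) 0)

def layer_sides (layer : Int) : List (List Int) :=
  if layer == 0 then [[1], [1], [1], [1]]
  else
    let side_length := (2 * layer) - 1
    let values := layer_values layer
    let corners := layer_corners layer
    (PySem.List.pyRange 0 4 1).foldl (fun sides i =>
      let side := [PySem.List.pyGetD corners (PySem.Int.mod (i - 1) (corners.length : Int)) 0]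
      let side := side ++ PySem.List.slice values (some (i * side_length + i)) (some ((i + 1) * side_length + i))
      let side := side ++ [PySem.List.pyGetD corners (PySem.Int.mod i (corners.length : Int)) 0]
      sides ++ [side]) []

-- ===== PORT B =====
def layer_sides_alt (layer : Int) : List (List Int) :=
  if layer == 0 then [[1], [1], [1], [1]]
  else
    let n := 2 * layer
    let start := (n - 1) ^ 2 + 1
    let last := start + 4 * n - 1
    let sides := [[last] ++ PySem.List.pyRange start (start + n) 1]
    (PySem.List.pyRange 1 4 1).foldl (fun sides i =>
      sides ++ [PySem.List.pyRange (start + n * i - 1) (start + n * (i + 1)) 1]) sides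

-- ===== PRECONDITION & SPEC =====
-- Pre_ excludes negative layers: there layer_values is the empty list and A's corner
-- lookup values[-1] raises IndexError (A never returns).
def Pre_layer_sides (layer : Int) : Prop := 0 ≤ layer
instance (layer : Int) : Decidable (Pre_layer_sides layer) := by unfold Pre_layer_sides; infer_instance
def pvWitness_layer_sides : Int := 2

def Spec_layer_sides (layer : Int) (out : List (List Int)) : Prop := out = layer_sides_alt layer
instance (layer : Int) (out : List (List Int)) : Decidable (Spec_layer_sides layer out) := by unfold Spec_layer_sides; infer_instance

-- ===== CLAIM (what is proved, stated in full; the proofs are below) =====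
def Claim_equal_layer_sides : Prop := ∀ (layer : Int), Dom_layer_sides layer → Pre_layer_sides layer → Spec_layer_sides layer (layer_sides layer)

-- ===== LEMMAS AND PROOFS =====

-- a slice of a consecutive range is the consecutive range of the shifted bounds
theorem slice_pyRange_one (a b lo hi : Int) (h0 : 0 ≤ lo) (h1 : lo ≤ hi) (h2 : hi ≤ b - a) :
    PySem.List.slice (PySem.List.pyRange a b 1) (some lo) (some hi) =
      PySem.List.pyRange (a + lo) (a + hi) 1 := by
  rw [PySem.List.slice_toNat _ h0 (le_trans h0 h1)]
  have hdrop : List.drop lo.toNat (PySem.List.pyRange a b 1) = PySem.List.pyRange (a + lo) b 1 := by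
    rw [show lo.toNat = (PySem.List.pyRange a (a + lo) 1).length from by
          rw [PySem.List.length_pyRange_one]; omega,
        PySem.List.pyRange_one_append a (a + lo) b (by omega) (by omega)]
    exact List.drop_left
  rw [hdrop,
      show hi.toNat - lo.toNat = (PySem.List.pyRange (a + lo) (a + hi) 1).length from by
        rw [PySem.List.length_pyRange_one]; omega,
      PySem.List.pyRange_one_append (a + lo) (a + hi) b (by omega) (by omega)]
  exact List.take_left

-- indexing into a consecutive range
theorem pyGetD_pyRange_one (a b i d : Int) (h0 : 0 ≤ i) (h1 : i < b - a) :
    PySem.List.pyGetD (PySem.List.pyRange a b 1) i d = a + i := by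
  rw [PySem.List.pyGetD_eq_getElem _ d h0
        (by rw [PySem.List.length_pyRange_one]; omega),
      PySem.List.getElem_pyRange_one]
  omega

-- a corner-ended side block is one consecutive range (sides 1..3)
theorem side_block (x y : Int) (hx : x ≤ y) :
    (x - 1) :: (PySem.List.pyRange x y 1 ++ [y]) = PySem.List.pyRange (x - 1) (y + 1) 1 := by
  have h2 : PySem.List.pyRange (x - 1) (y + 1) 1 = (x - 1) :: PySem.List.pyRange x (y + 1) 1 := by
    rw [PySem.List.pyRange_one_cons (by omega), show x - 1 + 1 = x by ring]
  rw [h2, PySem.List.pyRange_one_succ_right hx]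

theorem side_blockW (x y p q c1 c2 : Int) (hx : x ≤ y) (hc1 : c1 = x - 1) (hc2 : c2 = y)
    (hp : p = x - 1) (hq : q = y + 1) :
    c1 :: (PySem.List.pyRange x y 1 ++ [c2]) = PySem.List.pyRange p q 1 := by
  rw [hc1, hc2, hp, hq]; exact side_block x y hx

-- side 0: head corners are ring-equal; the tail corner folds into the range
theorem tail_blockW (x y p q c2 : Int) (hx : x ≤ y) (hc2 : c2 = y) (hp : p = x) (hq : q = y + 1) :
    PySem.List.pyRange x y 1 ++ [c2] = PySem.List.pyRange p q 1 := by
  rw [hc2, hp, hq, PySem.List.pyRange_one_succ_right hx]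

theorem values_eq (layer : Int) (h : 1 ≤ layer) :
    layer_values layer =
      PySem.List.pyRange ((2 * layer - 1) ^ 2 + 1) ((2 * layer - 1) ^ 2 + 1 + 8 * layer) 1 := by
  simp only [layer_values]
  rw [if_neg (by simp; omega)]
  rw [show ((layer * 2 + 1 - 2) ^ 2 + 1 : Int) = (2 * layer - 1) ^ 2 + 1 by ring,
      show ((layer * 2 + 1) ^ 2 + 1 : Int) = (2 * layer - 1) ^ 2 + 1 + 8 * layer by ring]

theorem corners_eq (layer : Int) (h : 1 ≤ layer) :
    layer_corners layer =
      [(2 * layer - 1) ^ 2 + 2 * layer, (2 * layer - 1) ^ 2 + 4 * layer,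
       (2 * layer - 1) ^ 2 + 6 * layer, (2 * layer - 1) ^ 2 + 8 * layer] := by
  simp only [layer_corners]
  rw [values_eq layer h]
  rw [PySem.List.length_pyRange_one]
  have hlen : (((((2 * layer - 1) ^ 2 + 1 + 8 * layer) - ((2 * layer - 1) ^ 2 + 1)).toNat : Int)) = 8 * layer := by
    omega
  rw [hlen]
  have hstep : PySem.Int.truncdiv (8 * layer) 4 = 2 * layer := by
    simp [PySem.Int.truncdiv]
    rw [show (8 : Int) * layer = (2 * layer) * 4 by ring, Int.mul_tdiv_cancel _ (by norm_num)]
  rw [hstep]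
  rw [show PySem.List.pyRange 0 4 1 = [0, 1, 2, 3] from by decide]
  simp only [List.map]
  rw [pyGetD_pyRange_one _ _ _ _ (by omega) (by omega),
      pyGetD_pyRange_one _ _ _ _ (by omega) (by omega),
      pyGetD_pyRange_one _ _ _ _ (by omega) (by omega),
      pyGetD_pyRange_one _ _ _ _ (by omega) (by omega)]
  norm_num
  and_intros <;> ring

-- ===== VERDICT (by name: the statement is the Claim_ definition above) =====
set_option maxHeartbeats 2000000 in
theorem layer_sides_spec : Claim_equal_layer_sides := by
  intro layer _ hpre
  unfold Spec_layer_sides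
  by_cases h0 : layer = 0
  · subst h0; decide
  · have h : 1 ≤ layer := by unfold Pre_layer_sides at hpre; omega
    unfold layer_sides layer_sides_alt
    rw [if_neg (by simp [h0]), if_neg (by simp [h0])]
    rw [values_eq layer h, corners_eq layer h]
    set s : Int := (2 * layer - 1) ^ 2 + 1 with hs
    rw [show PySem.List.pyRange 0 4 1 = [0, 1, 2, 3] from by decide,
        show PySem.List.pyRange 1 4 1 = [1, 2, 3] from by decide]
    simp only [List.foldl, List.length, List.nil_append]
    rw [show (((0 + 1 + 1 + 1 + 1 : Nat)) : Int) = 4 from by norm_num]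
    rw [show PySem.Int.mod ((0:Int) - 1) 4 = 3 from by decide,
        show PySem.Int.mod ((1:Int) - 1) 4 = 0 from by decide,
        show PySem.Int.mod ((2:Int) - 1) 4 = 1 from by decide,
        show PySem.Int.mod ((3:Int) - 1) 4 = 2 from by decide,
        show PySem.Int.mod (0:Int) 4 = 0 from by decide,
        show PySem.Int.mod (1:Int) 4 = 1 from by decide,
        show PySem.Int.mod (2:Int) 4 = 2 from by decide,
        show PySem.Int.mod (3:Int) 4 = 3 from by decide]
    have g0 : ∀ a b c d : Int, PySem.List.pyGetD [a,b,c,d] 0 0 = a := by intro a b c d; simp [pysem]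
    have g1 : ∀ a b c d : Int, PySem.List.pyGetD [a,b,c,d] 1 0 = b := by intro a b c d; simp [pysem]
    have g2 : ∀ a b c d : Int, PySem.List.pyGetD [a,b,c,d] 2 0 = c := by intro a b c d; simp [pysem]
    have g3 : ∀ a b c d : Int, PySem.List.pyGetD [a,b,c,d] 3 0 = d := by intro a b c d; simp [pysem]
    rw [g0, g1, g2, g3]
    rw [show ((0:Int) * (2 * layer - 1) + 0) = 0 by ring,
        show ((0:Int) + 1) * (2 * layer - 1) + 0 = 2 * layer - 1 by ring,
        show ((1:Int) * (2 * layer - 1) + 1) = 2 * layer by ring,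
        show ((1:Int) + 1) * (2 * layer - 1) + 1 = 4 * layer - 1 by ring,
        show ((2:Int) * (2 * layer - 1) + 2) = 4 * layer by ring,
        show ((2:Int) + 1) * (2 * layer - 1) + 2 = 6 * layer - 1 by ring,
        show ((3:Int) * (2 * layer - 1) + 3) = 6 * layer by ring,
        show ((3:Int) + 1) * (2 * layer - 1) + 3 = 8 * layer - 1 by ring]
    rw [slice_pyRange_one _ _ _ _ (by omega) (by omega) (by omega),
        slice_pyRange_one _ _ _ _ (by omega) (by omega) (by omega),
        slice_pyRange_one _ _ _ _ (by omega) (by omega) (by omega),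
        slice_pyRange_one _ _ _ _ (by omega) (by omega) (by omega)]
    simp only [List.cons_append, List.nil_append, List.cons.injEq, and_true]
    refine ⟨⟨by ring, ?_⟩, ?_, ?_, ?_⟩
    · refine tail_blockW _ _ _ _ _ ?_ ?_ ?_ ?_
      · linarith
      · rw [hs]; ring
      · rw [hs]; ring
      · rw [hs]; ring
    · refine side_blockW _ _ _ _ _ _ ?_ ?_ ?_ ?_ ?_
      · linarith
      · rw [hs]; ring
      · rw [hs]; ring
      · rw [hs]; ring
      · rw [hs]; ring
    · refine side_blockW _ _ _ _ _ _ ?_ ?_ ?_ ?_ ?_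
      · linarith
      · rw [hs]; ring
      · rw [hs]; ring
      · rw [hs]; ring
      · rw [hs]; ring
    · refine side_blockW _ _ _ _ _ _ ?_ ?_ ?_ ?_ ?_
      · linarith
      · rw [hs]; ring
      · rw [hs]; ring
      · rw [hs]; ring
      · rw [hs]; ring
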